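-- pv_equiv track=rewrite | github.com/ETOgaosion/Megatron-LM-AutoTuner | AutoTuner/runtime/baseline/simulator.py | build_chunk_layer_counts
-- ===== SOURCE A (Python) =====
-- def build_chunk_layer_counts(
--     total_layers: int, pp_size: int, vpp_size: int
-- ) -> list[int]:
--     total_layers = max(0, int(total_layers))
--     pp_size = max(1, int(pp_size))
--     vpp_size = max(1, int(vpp_size))
--     total_chunks = pp_size * vpp_size
--     counts: list[int] = []
--     for chunk_id in range(total_chunks):
--         start = (chunk_id * total_layers) // total_chunks
--         end = ((chunk_id + 1) * total_layers) // total_chunks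
--         counts.append(max(0, end - start))
--     return counts
-- ===== SOURCE B (Python) =====
-- def build_chunk_layer_counts(
--     total_layers: int, pp_size: int, vpp_size: int
-- ) -> list[int]:
--     total_layers = max(0, int(total_layers))
--     pp_size = max(1, int(pp_size))
--     vpp_size = max(1, int(vpp_size))
--     total_chunks = pp_size * vpp_size
--     base = total_layers // total_chunks
--     rem = total_layers % total_chunks
--     counts: list[int] = []
--     acc = 0
--     for _ in range(total_chunks):
--         c = base
--         acc += rem
--         if acc >= total_chunks:
--             c += 1
--             acc -= total_chunks
--         counts.append(c)
--     return counts
-- ===== Notes on version B (the rewrite author's own statement) =====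
-- stated objective: alternative
-- what changed: Replaces the per-chunk floor formula (two integer divisions per chunk) with a single divmod followed by one pass that threads a running remainder accumulator, giving an extra layer whenever the accumulator reaches total_chunks.
import Mathlib
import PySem

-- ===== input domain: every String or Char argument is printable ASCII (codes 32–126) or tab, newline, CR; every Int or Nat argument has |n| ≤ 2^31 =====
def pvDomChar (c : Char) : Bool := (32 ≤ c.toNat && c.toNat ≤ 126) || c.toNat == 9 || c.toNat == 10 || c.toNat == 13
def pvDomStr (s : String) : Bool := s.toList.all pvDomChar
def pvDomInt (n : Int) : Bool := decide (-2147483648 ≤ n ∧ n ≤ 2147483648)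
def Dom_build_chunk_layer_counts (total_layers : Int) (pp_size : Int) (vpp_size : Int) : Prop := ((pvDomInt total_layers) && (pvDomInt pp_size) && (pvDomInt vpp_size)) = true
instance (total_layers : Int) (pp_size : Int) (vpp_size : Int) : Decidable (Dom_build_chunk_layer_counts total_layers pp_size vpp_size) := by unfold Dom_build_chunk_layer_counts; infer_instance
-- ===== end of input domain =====

-- B replaces the per-chunk floor-formula (two // per chunk) by one divmod plus a running
-- remainder accumulator (objective: alternative decomposition, same O(chunks) cost).

-- ===== PORT A =====
def build_chunk_layer_counts (total_layers : Int) (pp_size : Int) (vpp_size : Int) : List Int :=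
  let total_layers := max 0 total_layers
  let pp_size := max 1 pp_size
  let vpp_size := max 1 vpp_size
  let total_chunks := pp_size * vpp_size
  (PySem.List.pyRange 0 total_chunks 1).foldl
    (fun counts chunk_id =>
      counts ++ [max 0 (PySem.Int.floordiv ((chunk_id + 1) * total_layers) total_chunks
                        - PySem.Int.floordiv (chunk_id * total_layers) total_chunks)]) []

-- ===== PORT B =====
-- loop of Source B: n iterations remain, state = (base, rem, total_chunks, acc)
def pvBLoop : Nat → Int → Int → Int → Int → List Int
  | 0, _, _, _, _ => []
  | Nat.succ m, base, rem, total_chunks, acc =>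
      if total_chunks ≤ acc + rem then
        (base + 1) :: pvBLoop m base rem total_chunks (acc + rem - total_chunks)
      else
        base :: pvBLoop m base rem total_chunks (acc + rem)

def build_chunk_layer_counts_alt (total_layers : Int) (pp_size : Int) (vpp_size : Int) : List Int :=
  let total_layers := max 0 total_layers
  let pp_size := max 1 pp_size
  let vpp_size := max 1 vpp_size
  let total_chunks := pp_size * vpp_size
  let base := PySem.Int.floordiv total_layers total_chunks
  let rem := PySem.Int.mod total_layers total_chunks
  pvBLoop total_chunks.toNat base rem total_chunks 0

-- ===== PRECONDITION & SPEC =====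
def Spec_build_chunk_layer_counts (total_layers : Int) (pp_size : Int) (vpp_size : Int) (out : List Int) : Prop := out = build_chunk_layer_counts_alt total_layers pp_size vpp_size
instance (total_layers : Int) (pp_size : Int) (vpp_size : Int) (out : List Int) : Decidable (Spec_build_chunk_layer_counts total_layers pp_size vpp_size out) := by unfold Spec_build_chunk_layer_counts; infer_instance

-- ===== CLAIM (what is proved, stated in full; the proofs are below) =====
def Claim_equal_build_chunk_layer_counts : Prop := ∀ (total_layers : Int) (pp_size : Int) (vpp_size : Int), Dom_build_chunk_layer_counts total_layers pp_size vpp_size → Spec_build_chunk_layer_counts total_layers pp_size vpp_size (build_chunk_layer_counts total_layers pp_size vpp_size)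

-- ===== LEMMAS AND PROOFS =====

-- per-step arithmetic: the floor-formula count and the accumulator update,
-- both expressed through acc = (k*rem) % T
lemma pvKey (L T : Int) (hT : 0 < T) (k : Int) :
    (((k + 1) * L) / T - (k * L) / T
        = L / T + (if T ≤ (k * (L % T)) % T + L % T then 1 else 0))
    ∧ ((k + 1) * (L % T)) % T
        = (if T ≤ (k * (L % T)) % T + L % T then (k * (L % T)) % T + L % T - T
           else (k * (L % T)) % T + L % T) := by
  have hT0 : T ≠ 0 := ne_of_gt hT
  set rem := L % T with hrem
  set base := L / T with hbase
  set acc := (k * rem) % T with hacc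
  set q := (k * rem) / T with hq
  have hrem0 : 0 ≤ rem := Int.emod_nonneg L hT0
  have hremT : rem < T := Int.emod_lt_of_pos L hT
  have hacc0 : 0 ≤ acc := Int.emod_nonneg _ hT0
  have haccT : acc < T := Int.emod_lt_of_pos _ hT
  have hLdecomp : L = T * base + rem := (Int.mul_ediv_add_emod L T).symm
  have hk : k * rem = T * q + acc := (Int.mul_ediv_add_emod (k * rem) T).symm
  have hdiv : ∀ i : Int, (i * L) / T = i * base + (i * rem) / T := by
    intro i
    have h1 : i * L = i * rem + (i * base) * T := by rw [hLdecomp]; ring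
    rw [h1, Int.add_mul_ediv_right _ _ hT0]; ring
  have hk1rem : (k + 1) * rem = (acc + rem) + q * T := by
    rw [add_mul, one_mul, hk]; ring
  have hfrac : (acc + rem) / T = if T ≤ acc + rem then 1 else 0 := by
    split_ifs with h
    · have h2 : acc + rem = (acc + rem - T) + 1 * T := by ring
      rw [h2, Int.add_mul_ediv_right _ _ hT0,
        Int.ediv_eq_zero_of_lt (by omega) (by omega)]
      norm_num
    · exact Int.ediv_eq_zero_of_lt (by omega) (by omega)
  constructor
  · rw [hdiv (k + 1), hdiv k, hk1rem, Int.add_mul_ediv_right _ _ hT0, hfrac, ← hq]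
    split_ifs <;> ring
  · have hm : (acc + rem + q * T) % T = (acc + rem) % T := by
      have : acc + rem + q * T = acc + rem + T * q := by ring
      rw [this, Int.add_mul_emod_self_left]
    rw [hk1rem, hm, Int.emod_def, hfrac]
    split_ifs <;> ring

-- the accumulator loop computes the floor-formula counts, shifted by the start index k
lemma pvBLoop_eq_map (L T : Int) (hT : 0 < T) (hL : 0 ≤ L) :
    ∀ (n : Nat) (k : Int),
      pvBLoop n (L / T) (L % T) T ((k * (L % T)) % T)
        = (List.range n).map
            (fun j : Nat => max 0 (((k + (j : Int) + 1) * L) / T - ((k + (j : Int)) * L) / T)) := by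
  intro n
  induction n with
  | zero => intro k; simp [pvBLoop]
  | succ m ih =>
    intro k
    obtain ⟨h1, h2⟩ := pvKey L T hT k
    have hbase0 : 0 ≤ L / T := Int.ediv_nonneg hL (le_of_lt hT)
    rw [List.range_succ_eq_map, List.map_cons, List.map_map]
    show pvBLoop (m + 1) (L / T) (L % T) T ((k * (L % T)) % T) = _
    rw [pvBLoop]
    by_cases h : T ≤ (k * (L % T)) % T + L % T
    · rw [if_pos h]
      have hacc' : (k * (L % T)) % T + L % T - T = ((k + 1) * (L % T)) % T := by
        rw [h2, if_pos h]
      rw [hacc', ih (k + 1)]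
      congr 1
      · rw [if_pos h] at h1
        simp only [Nat.cast_zero, add_zero]
        omega
      · apply List.map_congr_left
        intro j _
        simp only [Function.comp_apply, Nat.succ_eq_add_one]
        have : k + ((j + 1 : Nat) : Int) = (k + 1) + (j : Int) := by push_cast; ring
        rw [this]
    · rw [if_neg h]
      have hacc' : (k * (L % T)) % T + L % T = ((k + 1) * (L % T)) % T := by
        rw [h2, if_neg h]
      rw [hacc', ih (k + 1)]
      congr 1
      · rw [if_neg h] at h1
        simp only [Nat.cast_zero, add_zero]
        omega
      · apply List.map_congr_left
        intro j _
        simp only [Function.comp_apply, Nat.succ_eq_add_one]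
        have : k + ((j + 1 : Nat) : Int) = (k + 1) + (j : Int) := by push_cast; ring
        rw [this]

-- ===== VERDICT (by name: the statement is the Claim_ definition above) =====
theorem build_chunk_layer_counts_spec : Claim_equal_build_chunk_layer_counts := by
  intro tl pp vpp _
  unfold Spec_build_chunk_layer_counts
  simp only [build_chunk_layer_counts, build_chunk_layer_counts_alt]
  set L := max 0 tl with hLdef
  set P := max 1 pp with hPdef
  set V := max 1 vpp with hVdef
  have hP : 0 < P := lt_of_lt_of_le one_pos (le_max_left 1 pp)
  have hV : 0 < V := lt_of_lt_of_le one_pos (le_max_left 1 vpp)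
  have hT : 0 < P * V := mul_pos hP hV
  have hL : 0 ≤ L := le_max_left 0 tl
  set T := P * V with hTdef
  have hB : pvBLoop T.toNat (L / T) (L % T) T 0
      = (List.range T.toNat).map
          (fun j : Nat => max 0 ((((j : Int)) + 1) * L / T - ((j : Int)) * L / T)) := by
    have h := pvBLoop_eq_map L T hT hL T.toNat 0
    simpa using h
  rw [PySem.Int.floordiv_eq_ediv_of_pos hT, PySem.Int.mod_eq_emod_of_pos hT, hB,
    PySem.List.foldl_append_singleton_eq_map, PySem.List.pyRange_one, List.map_map,
    List.nil_append]
  simp only [sub_zero, zero_add]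
  apply List.map_congr_left
  intro j _
  simp only [Function.comp_apply]
  rw [PySem.Int.floordiv_eq_ediv_of_pos hT, PySem.Int.floordiv_eq_ediv_of_pos hT]
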